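-- pv_equiv track=rewrite | github.com/BailinYe/Resume_Modifier | core/app/services/resume_generator.py | _apply_confident_tone
-- ===== SOURCE A (Python) =====
-- def _apply_confident_tone(content: str) -> str:
--     """Apply confident tone to content"""
--     # Add action words and confident language
--     confident_words = {
--         'helped': 'led',
--         'worked on': 'spearheaded',
--         'participated in': 'drove',
--         'contributed to': 'delivered'
--     }
--
--     result = content
--     for weak, strong in confident_words.items():
--         result = result.replace(weak, strong)
--
--     return result
-- ===== SOURCE B (Python) =====
-- def _apply_confident_tone(content: str) -> str:
--     """Apply confident tone to content"""
--     # One left-to-right pass that replaces all weak phrases simultaneously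
--     # (no weak phrase overlaps another and no strong word contains one,
--     # so a single scan yields the same text as sequential full passes).
--     replacements = (
--         ('helped', 'led'),
--         ('worked on', 'spearheaded'),
--         ('participated in', 'drove'),
--         ('contributed to', 'delivered'),
--     )
--     pieces = []
--     i = 0
--     n = len(content)
--     while i < n:
--         for weak, strong in replacements:
--             if content.startswith(weak, i):
--                 pieces.append(strong)
--                 i += len(weak)
--                 break
--         else:
--             pieces.append(content[i])
--             i += 1
--     return ''.join(pieces)
-- ===== Notes on version B (the rewrite author's own statement) =====
-- stated objective: alternative
-- what changed: Four sequential full str.replace passes are replaced by a single left-to-right scan that matches all four weak phrases simultaneously and emits the strong word in place.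
import Mathlib
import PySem

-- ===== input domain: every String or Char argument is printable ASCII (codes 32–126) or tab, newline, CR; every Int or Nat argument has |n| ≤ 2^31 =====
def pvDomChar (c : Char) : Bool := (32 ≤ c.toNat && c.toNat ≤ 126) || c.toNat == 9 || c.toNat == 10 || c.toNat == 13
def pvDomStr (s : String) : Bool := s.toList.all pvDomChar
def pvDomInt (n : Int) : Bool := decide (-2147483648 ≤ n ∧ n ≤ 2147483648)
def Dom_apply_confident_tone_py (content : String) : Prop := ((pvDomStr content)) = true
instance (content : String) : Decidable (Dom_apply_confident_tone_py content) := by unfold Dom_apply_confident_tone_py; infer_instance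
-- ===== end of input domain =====

-- B replaces A's four sequential full-string replace passes by ONE left-to-right scan
-- matching all four weak phrases simultaneously (objective: alternative algorithm).

-- ===== PORT A =====
-- literal port of A: dict literal -> association list, then one str.replace per pair
def apply_confident_tone_py (content : String) : String :=
  let confident_words : List (String × String) :=
    [("helped", "led"), ("worked on", "spearheaded"),
     ("participated in", "drove"), ("contributed to", "delivered")]
  confident_words.foldl (fun result p => PySem.Str.replace result p.1 p.2) content

-- ===== PORT B =====
-- literal port of B's single scan: at each position try the four phrases in dict order;
-- on a match emit the strong word and skip the phrase, else copy one character.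
def pvAltGo : List Char → List Char
  | [] => []
  | c :: t =>
    if ("helped".toList).isPrefixOf (c :: t) then
      "led".toList ++ pvAltGo (t.drop 5)
    else if ("worked on".toList).isPrefixOf (c :: t) then
      "spearheaded".toList ++ pvAltGo (t.drop 8)
    else if ("participated in".toList).isPrefixOf (c :: t) then
      "drove".toList ++ pvAltGo (t.drop 14)
    else if ("contributed to".toList).isPrefixOf (c :: t) then
      "delivered".toList ++ pvAltGo (t.drop 13)
    else
      c :: pvAltGo t
termination_by l => l.length
decreasing_by all_goals simp

def apply_confident_tone_py_alt (content : String) : String :=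
  String.ofList (pvAltGo content.toList)

-- ===== PRECONDITION & SPEC =====
def Spec_apply_confident_tone_py (content : String) (out : String) : Prop := out = apply_confident_tone_py_alt content
instance (content : String) (out : String) : Decidable (Spec_apply_confident_tone_py content out) := by unfold Spec_apply_confident_tone_py; infer_instance

-- ===== CLAIM (what is proved, stated in full; the proofs are below) =====
def Claim_equal_apply_confident_tone_py : Prop := ∀ (content : String), Dom_apply_confident_tone_py content → Spec_apply_confident_tone_py content (apply_confident_tone_py content)

-- ===== LEMMAS AND PROOFS =====

-- proof-side fuel-free structural model of PySem.Chars.replace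
def pvRep (old new : List Char) : List Char → List Char
  | [] => []
  | c :: t =>
    if old ≠ [] ∧ old.isPrefixOf (c :: t) then new ++ pvRep old new (t.drop (old.length - 1))
    else c :: pvRep old new t
termination_by l => l.length
decreasing_by all_goals simp

lemma pvRep_nil (old new : List Char) : pvRep old new [] = [] := by simp [pvRep]

lemma pvRep_cons_neg (old new : List Char) (c : Char) (t : List Char)
    (h : ¬ old <+: (c :: t)) : pvRep old new (c :: t) = c :: pvRep old new t := by
  rw [pvRep]
  simp [List.isPrefixOf_iff_prefix, h]

lemma pvRep_consume (old new r : List Char) (hne : old ≠ []) :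
    pvRep old new (old ++ r) = new ++ pvRep old new r := by
  obtain ⟨o, os, rfl⟩ : ∃ o os, old = o :: os := by
    cases old with
    | nil => exact absurd rfl hne
    | cons o os => exact ⟨o, os, rfl⟩
  rw [List.cons_append, pvRep]
  simp [List.isPrefixOf_iff_prefix]

lemma pvRep_cons_neg2 (old new : List Char) (c : Char) (t : List Char)
    (h : ¬ (old ≠ [] ∧ old <+: (c :: t))) :
    pvRep old new (c :: t) = c :: pvRep old new t := by
  rw [pvRep]
  rw [if_neg (by simpa [List.isPrefixOf_iff_prefix] using h)]

-- rep passes unchanged through a block P inside which no match of `old` can start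
lemma pvRep_pass (old new P : List Char)
    (hC : ∀ k, k < P.length → ¬ (old <+: P.drop k) ∧ ¬ (P.drop k <+: old)) :
    ∀ y, pvRep old new (P ++ y) = P ++ pvRep old new y := by
  induction P with
  | nil => intro y; simp
  | cons c P' ih =>
    intro y
    have h0 := hC 0 (by simp)
    simp only [List.drop_zero] at h0
    have hnp : ¬ old <+: (c :: P') ++ y := by
      intro h
      rcases List.prefix_or_prefix_of_prefix h (List.prefix_append (c :: P') y) with h' | h'
      · exact h0.1 h'
      · exact h0.2 h'
    rw [List.cons_append, pvRep_cons_neg _ _ _ _ (by rwa [List.cons_append] at hnp)]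
    rw [ih (fun k hk => by simpa using hC (k + 1) (by simpa using hk)) y, List.cons_append]

-- if no piece of W can sit over `new`, a match of W reflects back through rep
lemma pvRep_reflect (old new W : List Char)
    (hC : ∀ k, k < W.length → ¬ (W.drop k <+: new) ∧ ¬ (new <+: W.drop k)) :
    ∀ l k, W.drop k <+: pvRep old new l → W.drop k <+: l := by
  intro l
  induction l with
  | nil => intro k h; rwa [pvRep_nil] at h
  | cons c t ih =>
    intro k h
    by_cases hp : old ≠ [] ∧ old <+: (c :: t)
    · by_cases hkW : k < W.length
      · exfalso
        rw [pvRep] at h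
        simp [List.isPrefixOf_iff_prefix, hp.1, hp.2] at h
        rcases List.prefix_or_prefix_of_prefix h (List.prefix_append new _) with h' | h'
        · exact (hC k hkW).1 h'
        · exact (hC k hkW).2 h'
      · have hnil : W.drop k = [] := List.drop_eq_nil_of_le (by omega)
        rw [hnil]
        exact List.nil_prefix
    · rw [pvRep_cons_neg2 _ _ _ _ hp] at h
      cases hW : W.drop k with
      | nil => exact List.nil_prefix
      | cons d v =>
        rw [hW, List.cons_prefix_cons] at h
        have hv : W.drop (k + 1) = v := by
          rw [← List.tail_drop, hW]
          rfl
        have hvt := ih (k + 1) (by rw [hv]; exact h.2)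
        rw [hv] at hvt
        exact List.cons_prefix_cons.mpr ⟨h.1, hvt⟩

-- PySem.Chars.replace.go equals pvRep (fuel ≥ length)
lemma pvGo_eq (old new : List Char) (hne : old ≠ []) :
    ∀ (fuel : Nat) (l acc : List Char), l.length ≤ fuel →
      PySem.Chars.replace.go old new fuel l acc = acc.reverse ++ pvRep old new l := by
  intro fuel
  induction fuel with
  | zero =>
    intro l acc hl
    have h0 : l = [] := by cases l <;> simp_all
    subst h0
    rw [pvRep_nil]
    rfl
  | succ n ih =>
    intro l acc hl
    cases l with
    | nil =>
      rw [pvRep_nil, List.append_nil]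
      rfl
    | cons c t =>
      have hol : 1 ≤ old.length := by cases old <;> simp_all
      have hstep :
          PySem.Chars.replace.go old new (n + 1) (c :: t) acc =
            if old.isPrefixOf (c :: t) = true then
              PySem.Chars.replace.go old new n (List.drop old.length (c :: t)) (new.reverse ++ acc)
            else
              PySem.Chars.replace.go old new n t (c :: acc) := rfl
      rw [hstep]
      by_cases hp : old <+: (c :: t)
      · have hb : old.isPrefixOf (c :: t) = true := List.isPrefixOf_iff_prefix.mpr hp
        rw [if_pos hb]
        rw [ih _ _ (by simp [List.length_drop] at *; omega)]
        rw [pvRep]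
        simp only [List.isPrefixOf_iff_prefix]
        rw [if_pos ⟨hne, hp⟩]
        obtain ⟨m, hm⟩ : ∃ m, old.length = m + 1 := ⟨old.length - 1, by omega⟩
        rw [hm]
        simp [List.reverse_append, List.append_assoc, List.drop_succ_cons]
      · have hb : old.isPrefixOf (c :: t) = false :=
          Bool.eq_false_iff.mpr fun hT => hp (List.isPrefixOf_iff_prefix.mp hT)
        rw [if_neg (by simp [hb])]
        rw [ih _ _ (by simp at hl; omega)]
        rw [pvRep_cons_neg _ _ _ _ hp]
        simp

lemma pvReplace_eq (old new l : List Char) (hne : old ≠ []) :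
    PySem.Chars.replace l old new = pvRep old new l := by
  rw [PySem.Chars.replace]
  have he : old.isEmpty = false := by simp [hne]
  rw [he]
  simpa using pvGo_eq old new hne l.length l [] le_rfl

-- the composition of A's four sequential replaces, as pvRep
def pvComp (l : List Char) : List Char :=
  pvRep "contributed to".toList "delivered".toList
    (pvRep "participated in".toList "drove".toList
      (pvRep "worked on".toList "spearheaded".toList
        (pvRep "helped".toList "led".toList l)))

lemma pvComp_W1 (r : List Char) :
    pvComp ("helped".toList ++ r) = "led".toList ++ pvComp r := by
  unfold pvComp
  rw [pvRep_consume _ _ _ (by decide)]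
  rw [pvRep_pass "worked on".toList "spearheaded".toList "led".toList (by decide)]
  rw [pvRep_pass "participated in".toList "drove".toList "led".toList (by decide)]
  rw [pvRep_pass "contributed to".toList "delivered".toList "led".toList (by decide)]

lemma pvComp_W2 (r : List Char) :
    pvComp ("worked on".toList ++ r) = "spearheaded".toList ++ pvComp r := by
  unfold pvComp
  rw [pvRep_pass "helped".toList "led".toList "worked on".toList (by decide)]
  rw [pvRep_consume _ _ _ (by decide)]
  rw [pvRep_pass "participated in".toList "drove".toList "spearheaded".toList (by decide)]
  rw [pvRep_pass "contributed to".toList "delivered".toList "spearheaded".toList (by decide)]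

lemma pvComp_W3 (r : List Char) :
    pvComp ("participated in".toList ++ r) = "drove".toList ++ pvComp r := by
  unfold pvComp
  rw [pvRep_pass "helped".toList "led".toList "participated in".toList (by decide)]
  rw [pvRep_pass "worked on".toList "spearheaded".toList "participated in".toList (by decide)]
  rw [pvRep_consume _ _ _ (by decide)]
  rw [pvRep_pass "contributed to".toList "delivered".toList "drove".toList (by decide)]

lemma pvComp_W4 (r : List Char) :
    pvComp ("contributed to".toList ++ r) = "delivered".toList ++ pvComp r := by
  unfold pvComp
  rw [pvRep_pass "helped".toList "led".toList "contributed to".toList (by decide)]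
  rw [pvRep_pass "worked on".toList "spearheaded".toList "contributed to".toList (by decide)]
  rw [pvRep_pass "participated in".toList "drove".toList "contributed to".toList (by decide)]
  rw [pvRep_consume _ _ _ (by decide)]

lemma pvComp_cons (c : Char) (t : List Char)
    (h1 : ¬ "helped".toList <+: c :: t)
    (h2 : ¬ "worked on".toList <+: c :: t)
    (h3 : ¬ "participated in".toList <+: c :: t)
    (h4 : ¬ "contributed to".toList <+: c :: t) :
    pvComp (c :: t) = c :: pvComp t := by
  have e1 : pvRep "helped".toList "led".toList (c :: t) =
      c :: pvRep "helped".toList "led".toList t := pvRep_cons_neg _ _ _ _ h1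
  have h2' : ¬ "worked on".toList <+: pvRep "helped".toList "led".toList (c :: t) := by
    intro h
    exact h2 (by
      simpa using pvRep_reflect "helped".toList "led".toList "worked on".toList
        (by decide) (c :: t) 0 (by simpa using h))
  rw [e1] at h2'
  have e2 : pvRep "worked on".toList "spearheaded".toList
      (pvRep "helped".toList "led".toList (c :: t)) =
      c :: pvRep "worked on".toList "spearheaded".toList
        (pvRep "helped".toList "led".toList t) := by
    rw [e1]; exact pvRep_cons_neg _ _ _ _ h2'
  have h3' : ¬ "participated in".toList <+:
      pvRep "worked on".toList "spearheaded".toList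
        (pvRep "helped".toList "led".toList (c :: t)) := by
    intro h
    have s1 := pvRep_reflect "worked on".toList "spearheaded".toList
      "participated in".toList (by decide)
      (pvRep "helped".toList "led".toList (c :: t)) 0 (by simpa using h)
    have s2 := pvRep_reflect "helped".toList "led".toList
      "participated in".toList (by decide) (c :: t) 0 (by simpa using s1)
    exact h3 (by simpa using s2)
  rw [e2] at h3'
  have e3 : pvRep "participated in".toList "drove".toList
      (pvRep "worked on".toList "spearheaded".toList
        (pvRep "helped".toList "led".toList (c :: t))) =
      c :: pvRep "participated in".toList "drove".toList
        (pvRep "worked on".toList "spearheaded".toList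
          (pvRep "helped".toList "led".toList t)) := by
    rw [e2]; exact pvRep_cons_neg _ _ _ _ h3'
  have h4' : ¬ "contributed to".toList <+:
      pvRep "participated in".toList "drove".toList
        (pvRep "worked on".toList "spearheaded".toList
          (pvRep "helped".toList "led".toList (c :: t))) := by
    intro h
    have s1 := pvRep_reflect "participated in".toList "drove".toList
      "contributed to".toList (by decide) _ 0 (by simpa using h)
    have s2 := pvRep_reflect "worked on".toList "spearheaded".toList
      "contributed to".toList (by decide) _ 0 (by simpa using s1)
    have s3 := pvRep_reflect "helped".toList "led".toList
      "contributed to".toList (by decide) (c :: t) 0 (by simpa using s2)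
    exact h4 (by simpa using s3)
  rw [e3] at h4'
  unfold pvComp
  rw [e3]
  exact pvRep_cons_neg _ _ _ _ h4'

lemma pvNePrefix {c d : Char} {u v : List Char} (h : c ≠ d) : ¬ (c :: u <+: d :: v) :=
  fun hp => h (List.cons_prefix_cons.mp hp).1

lemma pvAltGo_W1 (r : List Char) :
    pvAltGo ("helped".toList ++ r) = "led".toList ++ pvAltGo r := by
  show pvAltGo ('h' :: 'e' :: 'l' :: 'p' :: 'e' :: 'd' :: r) = _
  rw [pvAltGo]
  simp

lemma pvAltGo_W2 (r : List Char) :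
    pvAltGo ("worked on".toList ++ r) = "spearheaded".toList ++ pvAltGo r := by
  show pvAltGo ('w' :: 'o' :: 'r' :: 'k' :: 'e' :: 'd' :: ' ' :: 'o' :: 'n' :: r) = _
  rw [pvAltGo]
  simp [pvNePrefix (by decide : 'h' ≠ 'w')]

lemma pvAltGo_W3 (r : List Char) :
    pvAltGo ("participated in".toList ++ r) = "drove".toList ++ pvAltGo r := by
  show pvAltGo ('p' :: 'a' :: 'r' :: 't' :: 'i' :: 'c' :: 'i' :: 'p' :: 'a' :: 't' :: 'e' :: 'd' :: ' ' :: 'i' :: 'n' :: r) = _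
  rw [pvAltGo]
  simp [pvNePrefix (by decide : 'h' ≠ 'p'), pvNePrefix (by decide : 'w' ≠ 'p')]

lemma pvAltGo_W4 (r : List Char) :
    pvAltGo ("contributed to".toList ++ r) = "delivered".toList ++ pvAltGo r := by
  show pvAltGo ('c' :: 'o' :: 'n' :: 't' :: 'r' :: 'i' :: 'b' :: 'u' :: 't' :: 'e' :: 'd' :: ' ' :: 't' :: 'o' :: r) = _
  rw [pvAltGo]
  simp [pvNePrefix (by decide : 'h' ≠ 'c'), pvNePrefix (by decide : 'w' ≠ 'c'),
    pvNePrefix (by decide : 'p' ≠ 'c')]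

lemma pvAltGo_cons_neg (c : Char) (t : List Char)
    (h1 : ¬ "helped".toList <+: c :: t)
    (h2 : ¬ "worked on".toList <+: c :: t)
    (h3 : ¬ "participated in".toList <+: c :: t)
    (h4 : ¬ "contributed to".toList <+: c :: t) :
    pvAltGo (c :: t) = c :: pvAltGo t := by
  have h1' : ¬ ('h' = c ∧ ['e', 'l', 'p', 'e', 'd'] <+: t) := fun hh =>
    h1 (by
      rw [show "helped".toList = 'h' :: ['e', 'l', 'p', 'e', 'd'] from rfl]
      exact List.cons_prefix_cons.mpr hh)
  have h2' : ¬ ('w' = c ∧ ['o', 'r', 'k', 'e', 'd', ' ', 'o', 'n'] <+: t) := fun hh =>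
    h2 (by
      rw [show "worked on".toList = 'w' :: ['o', 'r', 'k', 'e', 'd', ' ', 'o', 'n'] from rfl]
      exact List.cons_prefix_cons.mpr hh)
  have h3' : ¬ ('p' = c ∧ ['a', 'r', 't', 'i', 'c', 'i', 'p', 'a', 't', 'e', 'd', ' ', 'i', 'n'] <+: t) := fun hh =>
    h3 (by
      rw [show "participated in".toList = 'p' :: ['a', 'r', 't', 'i', 'c', 'i', 'p', 'a', 't', 'e', 'd', ' ', 'i', 'n'] from rfl]
      exact List.cons_prefix_cons.mpr hh)
  have h4' : ¬ ('c' = c ∧ ['o', 'n', 't', 'r', 'i', 'b', 'u', 't', 'e', 'd', ' ', 't', 'o'] <+: t) := fun hh =>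
    h4 (by
      rw [show "contributed to".toList = 'c' :: ['o', 'n', 't', 'r', 'i', 'b', 'u', 't', 'e', 'd', ' ', 't', 'o'] from rfl]
      exact List.cons_prefix_cons.mpr hh)
  rw [pvAltGo]
  simp [List.isPrefixOf_iff_prefix, h1', h2', h3', h4']

-- B's single simultaneous scan equals A's four-pass composition
lemma pvAltGo_eq_aux : ∀ (n : Nat) (l : List Char), l.length ≤ n → pvAltGo l = pvComp l := by
  intro n
  induction n with
  | zero =>
    intro l hl
    have h0 : l = [] := by cases l <;> simp_all
    subst h0
    rw [pvAltGo]
    unfold pvComp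
    simp [pvRep_nil]
  | succ n ih =>
    intro l hl
    cases l with
    | nil =>
      rw [pvAltGo]
      unfold pvComp
      simp [pvRep_nil]
    | cons c t =>
      simp only [List.length_cons] at hl
      by_cases h1 : "helped".toList <+: c :: t
      · obtain ⟨r, hr⟩ := h1
        have hlen : r.length ≤ n := by
          have := congrArg List.length hr
          simp at this
          omega
        rw [← hr, pvAltGo_W1, pvComp_W1, ih r hlen]
      · by_cases h2 : "worked on".toList <+: c :: t
        · obtain ⟨r, hr⟩ := h2
          have hlen : r.length ≤ n := by
            have := congrArg List.length hr
            simp at this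
            omega
          rw [← hr, pvAltGo_W2, pvComp_W2, ih r hlen]
        · by_cases h3 : "participated in".toList <+: c :: t
          · obtain ⟨r, hr⟩ := h3
            have hlen : r.length ≤ n := by
              have := congrArg List.length hr
              simp at this
              omega
            rw [← hr, pvAltGo_W3, pvComp_W3, ih r hlen]
          · by_cases h4 : "contributed to".toList <+: c :: t
            · obtain ⟨r, hr⟩ := h4
              have hlen : r.length ≤ n := by
                have := congrArg List.length hr
                simp at this
                omega
              rw [← hr, pvAltGo_W4, pvComp_W4, ih r hlen]
            · rw [pvAltGo_cons_neg c t h1 h2 h3 h4, pvComp_cons c t h1 h2 h3 h4,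
                ih t (by omega)]

lemma pvAltGo_eq (l : List Char) : pvAltGo l = pvComp l :=
  pvAltGo_eq_aux l.length l le_rfl

-- ===== VERDICT (by name: the statement is the Claim_ definition above) =====
theorem apply_confident_tone_py_spec : Claim_equal_apply_confident_tone_py := by
  intro content _
  unfold Spec_apply_confident_tone_py apply_confident_tone_py apply_confident_tone_py_alt
  simp only [List.foldl]
  have hrep : ∀ s o n : String,
      PySem.Str.replace s o n = String.ofList (PySem.Chars.replace s.toList o.toList n.toList) :=
    fun _ _ _ => rfl
  simp only [hrep, String.toList_ofList]
  rw [pvReplace_eq _ _ _ (by decide), pvReplace_eq _ _ _ (by decide),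
    pvReplace_eq _ _ _ (by decide), pvReplace_eq _ _ _ (by decide)]
  rw [pvAltGo_eq content.toList]
  unfold pvComp
  rfl
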